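-- pv_equiv track=rewrite | github.com/alexbarajas/leetcode | interviews/virtu_financial_3.py | change_scores
-- ===== SOURCE A (Python) =====
-- def change_scores(X):
--     temp_array = list()
--     changed = False
--     for i in range(1, (len(X) - 1)):
--         if X[i - 1] < X[i] and X[i] > X[i + 1]:
--             changed = True
--             temp_array.append(X[i] - 1)
--         elif X[i - 1] > X[i] and X[i] < X[i + 1]:
--             changed = True
--             temp_array.append(X[i] + 1)
--         else:
--             temp_array.append(X[i])
--     return changed, temp_array
-- ===== SOURCE B (Python) =====
-- def change_scores(X):
--     # staged passes over the sign-of-difference sequence: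
--     # an interior element is a peak/valley exactly where consecutive
--     # difference signs are opposite; its adjustment is (s2 - s1) // 2.
--     signs = [(b > a) - (b < a) for a, b in zip(X, X[1:])]
--     deltas = [(s2 - s1) // 2 if s1 * s2 == -1 else 0
--               for s1, s2 in zip(signs, signs[1:])]
--     result = [x + d for x, d in zip(X[1:], deltas)]
--     return any(deltas), result
-- ===== Notes on version B (the rewrite author's own statement) =====
-- stated objective: alternative
-- what changed: Instead of A's single index loop comparing each interior element with both neighbours while maintaining a changed flag, B works on the derived sign-of-difference sequence in staged passes: it first maps consecutive pairs to difference signs, then maps consecutive sign pairs to +-1/0 adjustments ((s2-s1)//2 where signs are opposite), adds the adjustments to the interior, and derives changed as any(deltas).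
import Mathlib
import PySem

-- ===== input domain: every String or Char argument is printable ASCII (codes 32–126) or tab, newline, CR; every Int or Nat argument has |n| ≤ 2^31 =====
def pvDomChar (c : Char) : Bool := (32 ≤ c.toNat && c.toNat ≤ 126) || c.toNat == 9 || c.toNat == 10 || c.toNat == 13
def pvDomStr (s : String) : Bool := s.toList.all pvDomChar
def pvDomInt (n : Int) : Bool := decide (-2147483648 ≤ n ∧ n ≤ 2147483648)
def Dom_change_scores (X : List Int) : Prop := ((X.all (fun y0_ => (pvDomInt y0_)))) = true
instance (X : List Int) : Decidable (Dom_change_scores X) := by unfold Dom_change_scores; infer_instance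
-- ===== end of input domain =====

-- B recasts A's neighbour-comparison loop with its changed flag as staged passes over the
-- sign-of-difference sequence (signs, then ±1/0 adjustments, then addition; changed = any(deltas)).


-- ===== PORT A =====
-- loop body of A; the indices 1 ≤ i ≤ len-2 are always in range, so pyGetD (default 0) is exact
def pvBodyA (X : List Int) (st : Bool × List Int) (i : Int) : Bool × List Int :=
  let prev := PySem.List.pyGetD X (i - 1) 0
  let cur  := PySem.List.pyGetD X i 0
  let next := PySem.List.pyGetD X (i + 1) 0
  if prev < cur ∧ cur > next then (true, st.2 ++ [cur - 1])
  else if prev > cur ∧ cur < next then (true, st.2 ++ [cur + 1])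
  else (st.1, st.2 ++ [cur])

def change_scores (X : List Int) : Bool × List Int :=
  (PySem.List.pyRange 1 ((X.length : Int) - 1)).foldl (pvBodyA X) (false, [])

-- ===== PORT B =====
-- (b > a) - (b < a): Python booleans coerced to ints
def pvSign (a b : Int) : Int := (if a < b then 1 else 0) - (if b < a then 1 else 0)

-- X[1:] on a list is exactly List.drop 1 (nonnegative slice start)
def change_scores_alt (X : List Int) : Bool × List Int :=
  let signs := (X.zip (X.drop 1)).map (fun p => pvSign p.1 p.2)
  let deltas := (signs.zip (signs.drop 1)).map
    (fun p => if p.1 * p.2 = -1 then PySem.Int.floordiv (p.2 - p.1) 2 else 0)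
  let result := ((X.drop 1).zip deltas).map (fun p => p.1 + p.2)
  (deltas.any (fun d => decide (d ≠ 0)), result)

-- ===== PRECONDITION & SPEC =====
def Spec_change_scores (X : List Int) (out : Bool × List Int) : Prop := out = change_scores_alt X
instance (X : List Int) (out : Bool × List Int) : Decidable (Spec_change_scores X out) := by unfold Spec_change_scores; infer_instance

-- ===== CLAIM (what is proved, stated in full; the proofs are below) =====
def Claim_equal_change_scores : Prop := ∀ (X : List Int), Dom_change_scores X → Spec_change_scores X (change_scores X)

-- ===== LEMMAS AND PROOFS =====

-- pointwise views of A's loop, indexed from the head of X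
def pvF (X : List Int) (k : Nat) : Int :=
  if X.getD k 0 < X.getD (k+1) 0 ∧ X.getD (k+1) 0 > X.getD (k+2) 0 then X.getD (k+1) 0 - 1
  else if X.getD k 0 > X.getD (k+1) 0 ∧ X.getD (k+1) 0 < X.getD (k+2) 0 then X.getD (k+1) 0 + 1
  else X.getD (k+1) 0

def pvG (X : List Int) (k : Nat) : Bool :=
  decide (X.getD k 0 < X.getD (k+1) 0 ∧ X.getD (k+1) 0 > X.getD (k+2) 0) ||
  decide (X.getD k 0 > X.getD (k+1) 0 ∧ X.getD (k+1) 0 < X.getD (k+2) 0)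

-- B's delta at interior position k
def pvD (X : List Int) (k : Nat) : Int :=
  let s1 := pvSign (X.getD k 0) (X.getD (k+1) 0)
  let s2 := pvSign (X.getD (k+1) 0) (X.getD (k+2) 0)
  if s1 * s2 = -1 then PySem.Int.floordiv (s2 - s1) 2 else 0

lemma foldl_or_eq {α : Type} (g : α → Bool) :
    ∀ (l : List α) (b : Bool), l.foldl (fun acc x => acc || g x) b = (b || l.any g) := by
  intro l
  induction l with
  | nil => simp
  | cons a l ih =>
    intro b
    rw [List.foldl_cons, List.any_cons, ih, Bool.or_assoc]

lemma bodyA_eq (X : List Int) (st : Bool × List Int) (k : Nat) :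
    pvBodyA X st (1 + (k:Int)) = (st.1 || pvG X k, st.2 ++ [pvF X k]) := by
  have e0 : (1 + (k:Int) - 1) = ((k:Nat):Int) := by omega
  have e2 : (1 + (k:Int) + 1) = (((k+2):Nat):Int) := by push_cast; ring
  have e1 : (1 + (k:Int)) = (((k+1):Nat):Int) := by push_cast; ring
  simp only [pvBodyA]
  rw [e0, e2, e1]
  simp only [PySem.List.pyGetD_natCast, pvG, pvF]
  split_ifs with hA hB
  · rw [decide_eq_true hA]; simp
  · rw [decide_eq_true hB, decide_eq_false hA]; simp
  · rw [decide_eq_false hA, decide_eq_false hB]; simp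

lemma change_scores_eq (X : List Int) :
    change_scores X = ((List.range (X.length - 2)).any (pvG X),
                       (List.range (X.length - 2)).map (pvF X)) := by
  unfold change_scores
  rw [PySem.List.pyRange_one]
  have hlen : ((X.length : Int) - 1 - 1).toNat = X.length - 2 := by omega
  rw [hlen, List.foldl_map]
  have hbody : (fun (st : Bool × List Int) (k : Nat) => pvBodyA X st (1 + k))
      = fun st k => (st.1 || pvG X k, st.2 ++ [pvF X k]) := by
    funext st k
    exact bodyA_eq X st k
  rw [hbody]
  rw [PySem.List.foldl_prod_mk (fun b k => b || pvG X k) (fun l k => l ++ [pvF X k])]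
  rw [foldl_or_eq, PySem.List.foldl_append_singleton_eq_map]
  simp

-- a zip-with over l and its own drop 1 is a map over positions
lemma zip_tail_map (f : Int → Int → Int) :
    ∀ l : List Int, ((l.zip (l.drop 1)).map (fun p => f p.1 p.2))
      = (List.range (l.length - 1)).map (fun k => f (l.getD k 0) (l.getD (k+1) 0)) := by
  intro l
  match l with
  | [] => simp
  | [a] => simp
  | a :: b :: rest =>
    have ih := zip_tail_map f (b :: rest)
    simp only [List.drop_one, List.tail_cons, List.zip_cons_cons, List.map_cons] at ih ⊢
    rw [ih]
    simp only [List.length_cons]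
    have h : (rest.length + 1 + 1 - 1) = (rest.length + 1 - 1) + 1 := by omega
    rw [h, List.range_succ_eq_map, List.map_cons, List.map_map]
    congr 1

-- B's signs list, positionwise
lemma signs_eq (X : List Int) :
    (X.zip (X.drop 1)).map (fun p => pvSign p.1 p.2)
      = (List.range (X.length - 1)).map (fun k => pvSign (X.getD k 0) (X.getD (k+1) 0)) :=
  zip_tail_map pvSign X

lemma getD_map_range {f : Nat → Int} {n k : Nat} (h : k < n) :
    ((List.range n).map f).getD k 0 = f k := by
  rw [List.getD_eq_getElem?_getD]
  simp [h]

-- B's deltas list, positionwise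
lemma deltas_eq (X : List Int) :
    (((X.zip (X.drop 1)).map (fun p => pvSign p.1 p.2)).zip
        (((X.zip (X.drop 1)).map (fun p => pvSign p.1 p.2)).drop 1)).map
      (fun p => if p.1 * p.2 = -1 then PySem.Int.floordiv (p.2 - p.1) 2 else 0)
      = (List.range (X.length - 2)).map (pvD X) := by
  rw [signs_eq,
      zip_tail_map (fun s1 s2 => if s1 * s2 = -1 then PySem.Int.floordiv (s2 - s1) 2 else 0)]
  simp only [List.length_map, List.length_range]
  have hn : X.length - 1 - 1 = X.length - 2 := by omega
  rw [hn]
  apply List.map_congr_left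
  intro k hk
  have hk' : k < X.length - 2 := List.mem_range.mp hk
  rw [getD_map_range (by omega), getD_map_range (by omega)]
  rfl

-- zip of drop 1 with a (len-2)-long list, positionwise
lemma result_eq (X : List Int) (g : Nat → Int) :
    (((X.drop 1).zip ((List.range (X.length - 2)).map g)).map (fun p => p.1 + p.2))
      = (List.range (X.length - 2)).map (fun k => X.getD (k+1) 0 + g k) := by
  apply List.ext_getElem
  · simp; omega
  · intro k h1 h2
    simp only [List.getElem_map, List.getElem_zip, List.getElem_range, List.getElem_drop]
    simp only [List.length_map, List.length_zip, List.length_range, List.length_drop] at h1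
    have hk : k < X.length - 2 := by omega
    congr 1
    rw [List.getD_eq_getElem?_getD, List.getElem?_eq_getElem (by omega)]
    simp [Nat.add_comm 1 k]

lemma pvAnyCongr {α : Type} (l : List α) (p q : α → Bool) (h : ∀ x ∈ l, p x = q x) :
    l.any p = l.any q := by
  induction l with
  | nil => rfl
  | cons a l ih =>
    simp only [List.any_cons, h a (List.mem_cons_self), ih (fun x hx => h x (List.mem_cons_of_mem a hx))]

-- the arithmetic core: B's sign-based adjustment equals A's branch, and is ≠ 0 exactly on A's flag
lemma pvD_spec (X : List Int) (k : Nat) :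
    X.getD (k+1) 0 + pvD X k = pvF X k ∧ (decide (pvD X k ≠ 0) = pvG X k) := by
  simp only [pvD, pvF, pvG, pvSign]
  set a := X.getD k 0
  set b := X.getD (k+1) 0
  set c := X.getD (k+2) 0
  rcases lt_trichotomy a b with h1 | h1 | h1 <;> rcases lt_trichotomy b c with h2 | h2 | h2 <;>
    simp only [if_pos, h1, h2, lt_irrefl, not_lt_of_gt] <;>
    norm_num [PySem.Int.floordiv, show ((-2:Int).fdiv 2 = -1) from rfl,
      show ((2:Int).fdiv 2 = 1) from rfl] <;> omega

-- ===== VERDICT (by name: the statement is the Claim_ definition above) =====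
theorem change_scores_spec : Claim_equal_change_scores := by
  intro X _
  show change_scores X = change_scores_alt X
  rw [change_scores_eq]
  unfold change_scores_alt
  simp only [deltas_eq, result_eq X (pvD X)]
  refine Prod.ext ?_ ?_
  · simp only [List.any_map]
    exact pvAnyCongr _ _ _ (fun k hk => ((pvD_spec X k).2).symm)
  · exact (List.map_congr_left (fun k hk => (pvD_spec X k).1)).symm
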